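-- pv_equiv track=rewrite | github.com/DevaanshPathak/TechLang | techlang/parser.py | _remove_multiline_comments
-- ===== SOURCE A (Python) =====
-- def _remove_multiline_comments(code: str) -> str:
--     """Remove /* ... */ style multi-line comments from code."""
--     result = []
--     i = 0
--     length = len(code)
--
--     while i < length:
--         # Check for start of multi-line comment
--         if i < length - 1 and code[i:i+2] == '/*':
--             # Find the end of the comment
--             end = code.find('*/', i + 2)
--             if end != -1:
--                 # Skip to after the closing */
--                 i = end + 2
--             else:
--                 # Unclosed comment - skip rest of file
--                 break
--         else:
--             result.append(code[i])
--             i += 1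
--
--     return ''.join(result)
-- ===== SOURCE B (Python) =====
-- def _remove_multiline_comments(code: str) -> str:
--     """Remove /* ... */ style multi-line comments from code."""
--     parts = []
--     i = 0
--     while True:
--         start = code.find('/*', i)
--         if start == -1:
--             parts.append(code[i:])
--             break
--         parts.append(code[i:start])
--         end = code.find('*/', start + 2)
--         if end == -1:
--             break
--         i = end + 2
--     return ''.join(parts)
-- ===== Notes on version B (the rewrite author's own statement) =====
-- stated objective: faster
-- what changed: B replaces A's character-by-character scan (appending one char per iteration) with a chunk-copying loop over comment occurrences: find the next '/*', copy the whole preceding chunk at once, skip past the matching '*/', and append the final tail in one piece (C-level find/slice instead of per-char Python-level work).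
import Mathlib
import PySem

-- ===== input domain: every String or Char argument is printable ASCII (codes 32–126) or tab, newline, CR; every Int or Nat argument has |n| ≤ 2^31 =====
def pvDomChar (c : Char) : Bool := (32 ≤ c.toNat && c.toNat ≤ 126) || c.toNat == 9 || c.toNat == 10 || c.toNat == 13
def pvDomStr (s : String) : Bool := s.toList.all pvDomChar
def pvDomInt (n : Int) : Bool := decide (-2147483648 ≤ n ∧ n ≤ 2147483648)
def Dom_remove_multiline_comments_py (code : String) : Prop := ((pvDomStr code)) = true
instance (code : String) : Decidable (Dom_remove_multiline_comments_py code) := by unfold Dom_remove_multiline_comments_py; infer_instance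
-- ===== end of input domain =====

-- B chunk-copies the text between comment delimiters instead of A's char-by-char scan (objective: faster, constant-factor; measured).

-- code.find('*/', start): searches the given suffix; returns (chars skipped, remainder after '*/')
def pvFindClose : List Char → Option (List Char × List Char)
  | [] => none
  | [_] => none
  | a :: b :: rest =>
    if a = '*' ∧ b = '/' then some ([], rest)
    else (pvFindClose (b :: rest)).map (fun pr => (a :: pr.1, pr.2))

theorem pvFindClose_len : ∀ (s q a : List Char), pvFindClose s = some (q, a) → a.length < s.length := by
  intro s
  fun_induction pvFindClose s with
  | case1 => intro q a h; simp at h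
  | case2 => intro q a h; simp at h
  | case3 x y rest hif =>
      intro q a h
      simp at h
      obtain ⟨_, ha⟩ := h; subst ha; simp
  | case4 x y rest hif ih =>
      intro q a h
      simp [Option.map_eq_some_iff] at h
      obtain ⟨q', hf, hq⟩ := h
      have := ih q' a hf; simp at this ⊢; omega

-- ===== PORT A =====
-- literal port of A's while-loop: the index i is represented by the remaining suffix of the code;
-- the two-char test code[i:i+2] == '/*' is the test on the first two chars of the suffix
def pvARec (s : List Char) : List Char :=
  match s with
  | [] => []
  | [c] => [c]                          -- last char: the i < length-1 test fails, append it
  | a :: b :: rest =>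
    if a = '/' ∧ b = '*' then
      match h : pvFindClose rest with
      | none => []                      -- unclosed comment: break (drop rest of file)
      | some pr => pvARec pr.2          -- i = end + 2
    else a :: pvARec (b :: rest)        -- append code[i]; i += 1
termination_by s.length
decreasing_by
  · have := pvFindClose_len rest pr.1 pr.2 h; simp; omega
  · simp

def remove_multiline_comments_py (code : String) : String := String.ofList (pvARec code.toList)

-- ===== PORT B =====
-- code.find('/*', i): searches the remaining suffix; returns (chunk before '/*', remainder after '/*')
def pvFindOpen : List Char → Option (List Char × List Char)
  | [] => none
  | [_] => none
  | a :: b :: rest =>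
    if a = '/' ∧ b = '*' then some ([], rest)
    else (pvFindOpen (b :: rest)).map (fun pr => (a :: pr.1, pr.2))

theorem pvFindOpen_split : ∀ (s p r : List Char), pvFindOpen s = some (p, r) → s = p ++ '/' :: '*' :: r := by
  intro s
  fun_induction pvFindOpen s with
  | case1 => intro p r h; simp at h
  | case2 => intro p r h; simp at h
  | case3 x y rest hif =>
      intro p r h
      simp at h
      obtain ⟨hp, hr⟩ := h; subst hp; subst hr; simp [hif.1, hif.2]
  | case4 x y rest hif ih =>
      intro p r h
      simp [Option.map_eq_some_iff] at h
      obtain ⟨p', hf, hp⟩ := h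
      have := ih p' r hf; subst hp; simp [this]

-- chunk-copying loop of Source B: copy everything up to the next '/*', skip to after '*/', repeat;
-- when no '/*' remains the whole tail is appended; on a missing '*/' the tail is dropped
def pvBRec (s : List Char) : List Char :=
  match h : pvFindOpen s with
  | none => s
  | some pr =>
    pr.1 ++ (match h2 : pvFindClose pr.2 with
             | none => []
             | some qr => pvBRec qr.2)
termination_by s.length
decreasing_by
  have hs := pvFindOpen_split s pr.1 pr.2 h
  have h2' := pvFindClose_len pr.2 qr.1 qr.2 h2
  subst hs; simp; omega

def remove_multiline_comments_py_alt (code : String) : String := String.ofList (pvBRec code.toList)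

-- ===== PRECONDITION & SPEC =====
def Spec_remove_multiline_comments_py (code : String) (out : String) : Prop := out = remove_multiline_comments_py_alt code
instance (code : String) (out : String) : Decidable (Spec_remove_multiline_comments_py code out) := by unfold Spec_remove_multiline_comments_py; infer_instance

-- ===== CLAIM (what is proved, stated in full; the proofs are below) =====
def Claim_equal_remove_multiline_comments_py : Prop := ∀ (code : String), Dom_remove_multiline_comments_py code → Spec_remove_multiline_comments_py code (remove_multiline_comments_py code)

-- ===== LEMMAS AND PROOFS =====

theorem pvARec_open_none (r : List Char) (h : pvFindClose r = none) :
    pvARec ('/' :: '*' :: r) = [] := by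
  rw [pvARec, if_pos ⟨rfl, rfl⟩]
  split
  · rfl
  · next pr hpr => rw [h] at hpr; cases hpr

theorem pvARec_open_some (r : List Char) (pr : List Char × List Char)
    (h : pvFindClose r = some pr) : pvARec ('/' :: '*' :: r) = pvARec pr.2 := by
  rw [pvARec, if_pos ⟨rfl, rfl⟩]
  split
  · next hn => rw [h] at hn; cases hn
  · next pr' hpr => rw [h] at hpr; injection hpr with e; rw [e]

-- if there is no '/*' anywhere, A's scan copies the string verbatim
theorem pvARec_of_none : ∀ (s : List Char), pvFindOpen s = none → pvARec s = s := by
  intro s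
  fun_induction pvARec s with
  | case1 => intro _; rfl
  | case2 c => intro _; rfl
  | case3 a b rest hif hcl => intro hno; simp [pvFindOpen, hif] at hno
  | case4 a b rest hif pr hpr ih => intro hno; simp [pvFindOpen, hif] at hno
  | case5 a b rest hif ih =>
      intro hno
      simp [pvFindOpen, hif, Option.map_eq_none_iff] at hno
      simp [ih hno]

-- A's scan copies everything before the first '/*' verbatim, then behaves like A at that '/*'
theorem pvARec_of_some : ∀ (s p r : List Char), pvFindOpen s = some (p, r) →
    pvARec s = p ++ pvARec ('/' :: '*' :: r) := by
  intro s
  fun_induction pvARec s with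
  | case1 => intro p r h; simp [pvFindOpen] at h
  | case2 c => intro p r h; simp [pvFindOpen] at h
  | case3 a b rest hif hcl =>
      intro p r hop
      simp [pvFindOpen, hif] at hop
      obtain ⟨hp, hr⟩ := hop; subst hp; subst hr
      simp only [List.nil_append]
      exact (pvARec_open_none rest hcl).symm
  | case4 a b rest hif pr hpr ih =>
      intro p r hop
      simp [pvFindOpen, hif] at hop
      obtain ⟨hp, hr⟩ := hop; subst hp; subst hr
      simp only [List.nil_append]
      exact (pvARec_open_some rest pr hpr).symm
  | case5 a b rest hif ih =>
      intro p r hop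
      simp [pvFindOpen, hif, Option.map_eq_some_iff] at hop
      obtain ⟨p', hf, hp⟩ := hop
      subst hp
      simp [ih p' r hf]

theorem pvARec_eq_pvBRec_aux : ∀ (n : Nat) (s : List Char), s.length ≤ n → pvARec s = pvBRec s := by
  intro n
  induction n with
  | zero =>
      intro s hs
      have : s = [] := List.eq_nil_of_length_eq_zero (Nat.le_zero.mp hs)
      subst this
      simp [pvARec, pvBRec, pvFindOpen]
  | succ n ih =>
      intro s hs
      rw [pvBRec]
      split
      · next h => exact pvARec_of_none s h
      · next pr h =>
        rw [pvARec_of_some s pr.1 pr.2 (by simpa using h)]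
        congr 1
        have hs' := pvFindOpen_split s pr.1 pr.2 (by simpa using h)
        split
        · next h2 => exact pvARec_open_none pr.2 h2
        · next qr h2 =>
          rw [pvARec_open_some pr.2 qr h2]
          have hl := pvFindClose_len pr.2 qr.1 qr.2 (by simpa using h2)
          exact ih qr.2 (by subst hs'; simp at hs hl ⊢; omega)

theorem pvARec_eq_pvBRec (s : List Char) : pvARec s = pvBRec s :=
  pvARec_eq_pvBRec_aux s.length s (Nat.le_refl _)

-- ===== VERDICT (by name: the statement is the Claim_ definition above) =====
theorem remove_multiline_comments_py_spec : Claim_equal_remove_multiline_comments_py := by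
  intro code _
  show _ = _
  unfold remove_multiline_comments_py remove_multiline_comments_py_alt
  rw [pvARec_eq_pvBRec]
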